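-- pv_equiv track=rewrite | github.com/mysoundenough/NSGA | NSGA.py | getConflict
-- ===== SOURCE A (Python) =====
-- def getConflict(Detection, Model, len_cross, len_conflict, conflict):
--     len_conflict = 0
--     for i in range(len_cross):
--         flag = 1
--         for j in range(len_cross):
--             if (Detection[i] == Model[j]):
--                 j = len_cross
--                 flag = 0 # 如果交叉片段存在重复，交叉后不冲突，因此这个位置不是冲突
--         if (flag):
--             conflict[len_conflict] = Detection[i]
--             len_conflict += 1
--     return len_conflict, conflict
-- ===== SOURCE B (Python) =====
-- def getConflict(Detection, Model, len_cross, len_conflict, conflict):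
--     # build a sorted table of the compared Model prefix once, then binary-search it
--     model_sorted = sorted(Model[:len_cross])
--     m = len(model_sorted)
--     count = 0
--     for i in range(len_cross):
--         x = Detection[i]
--         lo, hi = 0, m
--         while lo < hi:
--             mid = (lo + hi) // 2
--             if model_sorted[mid] < x:
--                 lo = mid + 1
--             else:
--                 hi = mid
--         if lo == m or model_sorted[lo] != x:
--             conflict[count] = x
--             count += 1
--     return count, conflict
-- ===== Notes on version B (the rewrite author's own statement) =====
-- stated objective: faster
-- what changed: Replaces A's quadratic nested scan (an inner pass over Model for every Detection element) by sorting the compared Model prefix once and deciding each membership with a hand-written binary search.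
import Mathlib
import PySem

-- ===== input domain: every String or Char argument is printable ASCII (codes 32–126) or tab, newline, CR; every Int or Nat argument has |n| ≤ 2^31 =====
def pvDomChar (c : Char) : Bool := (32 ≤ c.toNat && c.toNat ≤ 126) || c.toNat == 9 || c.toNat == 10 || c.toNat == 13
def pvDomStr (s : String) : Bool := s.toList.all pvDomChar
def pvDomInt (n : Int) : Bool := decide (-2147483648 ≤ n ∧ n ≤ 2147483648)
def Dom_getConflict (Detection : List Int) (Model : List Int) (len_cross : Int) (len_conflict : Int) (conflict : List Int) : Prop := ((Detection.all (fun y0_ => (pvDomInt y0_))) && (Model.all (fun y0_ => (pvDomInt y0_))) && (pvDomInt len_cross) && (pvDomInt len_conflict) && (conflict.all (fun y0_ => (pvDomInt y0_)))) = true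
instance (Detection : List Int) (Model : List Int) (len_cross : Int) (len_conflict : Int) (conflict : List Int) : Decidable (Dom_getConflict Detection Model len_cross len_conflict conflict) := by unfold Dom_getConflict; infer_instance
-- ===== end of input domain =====

-- B sorts the compared Model prefix once and decides each membership by binary search
-- instead of A's inner scan over Model; a timing run measured B faster. Both A and B
-- mutate the caller's `conflict` list in place; the equivalence proved is about the
-- returned value (which contains that list).

-- ===== PORT A =====
def getConflict (Detection : List Int) (Model : List Int) (len_cross : Int) (len_conflict : Int) (conflict : List Int) : Int × List Int :=
  -- len_conflict = 0; for i in range(len_cross): … ; return len_conflict, conflict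
  (PySem.List.pyRange 0 len_cross 1).foldl (fun (st : Int × List Int) i =>
    let flag : Int := (PySem.List.pyRange 0 len_cross 1).foldl (fun (flag : Int) j =>
      if PySem.List.pyGetD Detection i 0 = PySem.List.pyGetD Model j 0 then 0 else flag) 1
    if flag ≠ 0 then
      (st.1 + 1, PySem.List.pySetD st.2 st.1 (PySem.List.pyGetD Detection i 0))
    else st) (0, conflict)

-- ===== PORT B =====
-- the hand-written bisect_left loop of Source B: while lo < hi: mid = (lo+hi)//2; …
-- (the fuel argument hi - lo only makes the while loop total; it is always sufficient)
def pvBisectGo (a : List Int) (x : Int) : Nat → Nat → Nat → Nat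
  | 0, lo, _ => lo
  | fuel + 1, lo, hi =>
    if lo < hi then
      let mid := (lo + hi) / 2
      if a.getD mid 0 < x then pvBisectGo a x fuel (mid + 1) hi else pvBisectGo a x fuel lo mid
    else lo

def pvBisect (a : List Int) (x : Int) (lo hi : Nat) : Nat := pvBisectGo a x (hi - lo) lo hi

def getConflict_alt (Detection : List Int) (Model : List Int) (len_cross : Int) (len_conflict : Int) (conflict : List Int) : Int × List Int :=
  let model_sorted := PySem.List.sorted (PySem.List.slice Model none (some len_cross)) (fun x => x)
  let m := model_sorted.length
  (PySem.List.pyRange 0 len_cross 1).foldl (fun (st : Int × List Int) i =>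
    let x := PySem.List.pyGetD Detection i 0
    let lo := pvBisect model_sorted x 0 m
    if lo = m ∨ ¬ (PySem.List.pyGetD model_sorted (lo : Int) 0 = x) then
      (st.1 + 1, PySem.List.pySetD st.2 st.1 x)
    else st) (0, conflict)

-- ===== PRECONDITION & SPEC =====
-- Pre_: exactly the inputs where the Python A returns normally: both indexed prefixes
-- are long enough and conflict has room for every detected conflict (else IndexError).
def Pre_getConflict (Detection : List Int) (Model : List Int) (len_cross : Int) (len_conflict : Int) (conflict : List Int) : Prop :=
  len_cross ≤ (Detection.length : Int) ∧ len_cross ≤ (Model.length : Int) ∧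
  ((((Detection.take len_cross.toNat).filter
      (fun x => !((Model.take len_cross.toNat).contains x))).length : Int) ≤ (conflict.length : Int))
instance (Detection : List Int) (Model : List Int) (len_cross : Int) (len_conflict : Int) (conflict : List Int) : Decidable (Pre_getConflict Detection Model len_cross len_conflict conflict) := by unfold Pre_getConflict; infer_instance

def pvWitness_getConflict : List Int × List Int × Int × Int × List Int := ([1, 5], [2, 1], 2, 0, [0])

def Spec_getConflict (Detection : List Int) (Model : List Int) (len_cross : Int) (len_conflict : Int) (conflict : List Int) (out : Int × List Int) : Prop := out = getConflict_alt Detection Model len_cross len_conflict conflict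
instance (Detection : List Int) (Model : List Int) (len_cross : Int) (len_conflict : Int) (conflict : List Int) (out : Int × List Int) : Decidable (Spec_getConflict Detection Model len_cross len_conflict conflict out) := by unfold Spec_getConflict; infer_instance

-- ===== CLAIM (what is proved, stated in full; the proofs are below) =====
def Claim_equal_getConflict : Prop := ∀ (Detection : List Int) (Model : List Int) (len_cross : Int) (len_conflict : Int) (conflict : List Int), Dom_getConflict Detection Model len_cross len_conflict conflict → Pre_getConflict Detection Model len_cross len_conflict conflict → Spec_getConflict Detection Model len_cross len_conflict conflict (getConflict Detection Model len_cross len_conflict conflict)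
-- ===== LEMMAS AND PROOFS =====

-- A's inner loop: the flag ends 0 iff some scanned element matched.
lemma foldl_flag (l : List Int) (p : Int → Prop) [DecidablePred p] (init : Int) :
    l.foldl (fun f j => if p j then 0 else f) init
      = if l.any (fun j => decide (p j)) then 0 else init := by
  induction l generalizing init with
  | nil => simp
  | cons a t ih =>
    by_cases h : p a <;> simp [List.foldl_cons, h, ih]

-- the inner scan over Model[0:n] sees exactly the members of Model.take n.toNat
lemma any_scan_eq_mem (Model : List Int) (n : Int) (x : Int) (h : n ≤ (Model.length : Int)) :
    ((PySem.List.pyRange 0 n 1).any (fun j => decide (x = PySem.List.pyGetD Model j 0))) = true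
      ↔ x ∈ Model.take n.toNat := by
  simp only [List.any_eq_true, decide_eq_true_eq, PySem.List.mem_pyRange_one]
  constructor
  · rintro ⟨j, ⟨h0, hjn⟩, hx⟩
    have hjl : j.toNat < Model.length := by omega
    rw [PySem.List.pyGetD_eq_getElem Model 0 h0 (by omega)] at hx
    rw [List.mem_take_iff_getElem]
    exact ⟨j.toNat, by omega, hx.symm⟩
  · intro hx
    rw [List.mem_take_iff_getElem] at hx
    obtain ⟨k, hk, hkx⟩ := hx
    refine ⟨(k : Int), ?_, ?_⟩
    · exact ⟨by omega, by omega⟩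
    · rw [PySem.List.pyGetD_eq_getElem Model 0 (by omega) (by simp; omega)]
      simp [hkx]

lemma getD_mono (a : List Int) (hs : a.Pairwise (· ≤ ·)) (i j : Nat)
    (hij : i ≤ j) (hj : j < a.length) : a.getD i 0 ≤ a.getD j 0 := by
  rw [List.getD_eq_getElem a 0 (by omega), List.getD_eq_getElem a 0 hj]
  rcases lt_or_eq_of_le hij with h | h
  · exact List.pairwise_iff_getElem.mp hs i j (by omega) hj h
  · subst h; rfl

lemma pvBisectGo_spec (a : List Int) (x : Int) (hs : a.Pairwise (· ≤ ·)) :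
    ∀ (n lo hi : Nat), hi - lo ≤ n → lo ≤ hi → hi ≤ a.length →
    (∀ j, j < lo → a.getD j 0 < x) → (∀ j, hi ≤ j → j < a.length → x ≤ a.getD j 0) →
    lo ≤ pvBisectGo a x n lo hi ∧ pvBisectGo a x n lo hi ≤ hi ∧
    (∀ j, j < pvBisectGo a x n lo hi → a.getD j 0 < x) ∧
    (∀ j, pvBisectGo a x n lo hi ≤ j → j < a.length → x ≤ a.getD j 0) := by
  intro n
  induction n with
  | zero =>
    intro lo hi hfuel hlo hhi hlow hhigh
    simp only [pvBisectGo]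
    exact ⟨le_refl _, hlo, hlow, fun j hj hjl => hhigh j (by omega) hjl⟩
  | succ n ih =>
    intro lo hi hfuel hlo hhi hlow hhigh
    simp only [pvBisectGo]
    by_cases h : lo < hi
    · simp only [h, if_true]
      have hmid : (lo + hi) / 2 < a.length := by omega
      by_cases hlt : a.getD ((lo + hi) / 2) 0 < x
      · rw [if_pos hlt]
        obtain ⟨t1, t2, t3, t4⟩ := ih ((lo + hi) / 2 + 1) hi (by omega) (by omega) hhi
          (fun j hj => by
            rcases Nat.lt_or_ge j lo with hc | hc
            · exact hlow j hc
            · exact lt_of_le_of_lt (getD_mono a hs j ((lo + hi) / 2) (by omega) hmid) hlt)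
          hhigh
        exact ⟨by omega, t2, t3, t4⟩
      · rw [if_neg hlt]
        have hxm : x ≤ a.getD ((lo + hi) / 2) 0 := not_lt.mp hlt
        obtain ⟨t1, t2, t3, t4⟩ := ih lo ((lo + hi) / 2) (by omega) (by omega) (by omega) hlow
          (fun j hj hjl => le_trans hxm (getD_mono a hs ((lo + hi) / 2) j hj hjl))
        exact ⟨t1, by omega, t3, t4⟩
    · simp only [h, if_false]
      exact ⟨le_refl _, hlo, hlow, fun j hj hjl => hhigh j (by omega) hjl⟩

-- the binary-search test decides non-membership on a sorted list
lemma pvBisect_not_mem (a : List Int) (x : Int) (hs : a.Pairwise (· ≤ ·)) :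
    (pvBisect a x 0 a.length = a.length ∨ ¬ (a.getD (pvBisect a x 0 a.length) 0 = x))
      ↔ x ∉ a := by
  obtain ⟨_, hle, hlt, hge⟩ := pvBisectGo_spec a x hs (a.length - 0) 0 a.length (le_refl _)
    (Nat.zero_le _) (le_refl _)
    (fun j hj => absurd hj (Nat.not_lt_zero j)) (fun j hj hjl => absurd hjl (by omega))
  rw [show pvBisect a x 0 a.length = pvBisectGo a x (a.length - 0) 0 a.length from rfl]
  set r := pvBisectGo a x (a.length - 0) 0 a.length with hr
  constructor
  · rintro (h | h) hmem
    · obtain ⟨k, hk, hkx⟩ := List.mem_iff_getElem.mp hmem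
      have := hlt k (by omega)
      rw [List.getD_eq_getElem a 0 hk] at this
      omega
    · obtain ⟨k, hk, hkx⟩ := List.mem_iff_getElem.mp hmem
      rcases Nat.lt_or_ge k r with hc | hc
      · have := hlt k hc; rw [List.getD_eq_getElem a 0 hk] at this; omega
      · have h1 : x ≤ a.getD r 0 := hge r (le_refl _) (by omega)
        have h2 : a.getD r 0 ≤ a.getD k 0 := getD_mono a hs r k hc hk
        rw [List.getD_eq_getElem a 0 hk] at h2
        exact h (by omega)
  · intro hnm
    by_contra hc
    push_neg at hc
    obtain ⟨hne, heq⟩ := hc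
    have hrl : r < a.length := lt_of_le_of_ne hle hne
    exact hnm (heq ▸ (List.getD_eq_getElem a 0 hrl ▸ List.getElem_mem hrl))

-- membership in the sorted slice = membership in Model.take n.toNat (0 ≤ n ≤ len)
lemma mem_sorted_slice (Model : List Int) (n : Int) (x : Int) (h0 : 0 ≤ n)
    (h : n ≤ (Model.length : Int)) :
    x ∈ PySem.List.sorted (PySem.List.slice Model none (some n)) (fun x => x)
      ↔ x ∈ Model.take n.toNat := by
  rw [PySem.List.mem_sorted, PySem.List.slice_to Model h0]

theorem getConflict_spec : Claim_equal_getConflict := by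
  unfold Claim_equal_getConflict
  intro Detection Model len_cross len_conflict conflict _ hpre
  obtain ⟨hD, hM, hC⟩ := hpre
  unfold Spec_getConflict getConflict getConflict_alt
  by_cases hn : len_cross ≤ 0
  · rw [PySem.List.pyRange_one_eq_nil (by omega)]
    simp
  · push_neg at hn
    set ms := PySem.List.sorted (PySem.List.slice Model none (some len_cross)) (fun x => x) with hms
    have hsorted : ms.Pairwise (· ≤ ·) := PySem.List.sorted_pairwise _ _
    apply PySem.List.foldl_congr_mem
    intro st i _
    simp only
    congr 1
    set x := PySem.List.pyGetD Detection i 0 with hx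
    have hflag : ((PySem.List.pyRange 0 len_cross 1).foldl (fun (flag : Int) j =>
        if x = PySem.List.pyGetD Model j 0 then 0 else flag) 1)
        = if ((PySem.List.pyRange 0 len_cross 1).any
            (fun j => decide (x = PySem.List.pyGetD Model j 0))) then 0 else 1 :=
      foldl_flag _ _ 1
    rw [hflag]
    by_cases hmem : x ∈ Model.take len_cross.toNat
    · have h1 : ((PySem.List.pyRange 0 len_cross 1).any
          (fun j => decide (x = PySem.List.pyGetD Model j 0))) = true :=
        (any_scan_eq_mem Model len_cross x hM).mpr hmem
      have h2 : x ∈ ms := (mem_sorted_slice Model len_cross x (by omega) hM).mpr hmem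
      have h3 : ¬ (pvBisect ms x 0 ms.length = ms.length ∨
          ¬ (ms.getD (pvBisect ms x 0 ms.length) 0 = x)) :=
        fun hc => (pvBisect_not_mem ms x hsorted).mp hc h2
      simp only [List.getD_eq_getElem?_getD] at h3
      simp [h1, PySem.List.pyGetD_natCast]
      tauto
    · have h1 : ((PySem.List.pyRange 0 len_cross 1).any
          (fun j => decide (x = PySem.List.pyGetD Model j 0))) = false := by
        rw [← Bool.not_eq_true]
        exact fun hc => hmem ((any_scan_eq_mem Model len_cross x hM).mp hc)
      have h2 : x ∉ ms := fun hc => hmem ((mem_sorted_slice Model len_cross x (by omega) hM).mp hc)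
      have h3 : (pvBisect ms x 0 ms.length = ms.length ∨
          ¬ (ms.getD (pvBisect ms x 0 ms.length) 0 = x)) :=
        (pvBisect_not_mem ms x hsorted).mpr h2
      simp only [List.getD_eq_getElem?_getD] at h3
      simp [h1, PySem.List.pyGetD_natCast]
      tauto
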